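-- pv_equiv track=rewrite | github.com/timopol8/samplecode | Minesweeper/part2final.py | count_ninjas
-- ===== SOURCE A (Python) =====
-- def count_ninjas(x5, y5, roomi):  # find the number
--     """
--     Counts the ninjas surrounding one tile in the given room and
--     returns the result. The function assumes the selected tile does
--     not have a ninja in it - if it does, it counts that one as well.
--     """
--     num = 0  # j - x coor; i = y coor. Starts from top left
--     for i, rows in enumerate(roomi):
--         if i in range(y5 - 1, y5 + 2):
--             for j, cell in enumerate(rows):
--                 if j in range(x5 - 1, x5 + 2):
--                     if cell == 'x':
--                         num += 1
--                         roomi[y5][x5] = f'{num}'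
--     return str(int(num))
-- ===== SOURCE B (Python) =====
-- def count_ninjas(x5, y5, roomi):
--     """Inspect the up-to-9 neighbourhood cells directly with bounds checks
--     instead of scanning the whole room.  Return value only: unlike A, this does
--     not write the running count into roomi[y5][x5]."""
--     num = 0
--     for dy in (-1, 0, 1):
--         for dx in (-1, 0, 1):
--             i, j = y5 + dy, x5 + dx
--             if 0 <= i < len(roomi) and 0 <= j < len(roomi[i]) and roomi[i][j] == 'x':
--                 num += 1
--     return str(num)
-- ===== Notes on version B (the rewrite author's own statement) =====
-- stated objective: alternative
-- what changed: B inspects only the up-to-9 neighbourhood cells (offset pairs dy,dx in {-1,0,1} with bounds checks) instead of A's scan over every cell of the room filtering on window membership, and B does not mutate the room.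
-- intended difference: When the selected tile itself holds a ninja ('x') and some earlier-in-scan-order cell of its 3x3 window also holds one, A overwrites the selected tile with the running count before reading it and so returns a count that silently omits the selected tile's ninja, while B returns the full window count that A's docstring promises ('if it does, it counts that one as well'). — e.g. on count_ninjas(1, 1, [["x", ".", "."], [".", "x", "."], [".", ".", "."]]): A returns "1", B returns "2"
-- outside the precondition, e.g. on count_ninjas(-1, 0, [['x']]): A returns '1', B returns '1'; on count_ninjas(1, 0, [['x']]): A raises IndexError, B returns '1'
import Mathlib
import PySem

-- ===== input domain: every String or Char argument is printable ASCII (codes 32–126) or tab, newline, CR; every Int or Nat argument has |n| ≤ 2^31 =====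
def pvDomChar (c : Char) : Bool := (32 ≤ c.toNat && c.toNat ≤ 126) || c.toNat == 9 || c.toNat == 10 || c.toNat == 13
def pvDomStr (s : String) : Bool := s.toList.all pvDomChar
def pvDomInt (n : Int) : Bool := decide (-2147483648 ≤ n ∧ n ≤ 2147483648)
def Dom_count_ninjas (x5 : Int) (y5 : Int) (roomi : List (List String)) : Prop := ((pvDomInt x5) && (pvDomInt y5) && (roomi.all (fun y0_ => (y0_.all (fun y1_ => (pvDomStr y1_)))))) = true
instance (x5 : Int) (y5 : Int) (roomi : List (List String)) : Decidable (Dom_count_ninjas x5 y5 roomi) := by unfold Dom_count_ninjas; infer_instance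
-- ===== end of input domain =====

-- B counts the up-to-9 neighbourhood cells directly instead of A's scan of the whole
-- room; equivalence is about the RETURN value only: A writes the running count into
-- roomi[y5][x5] as a side effect, B does not mutate the room.

-- ===== PORT A =====
-- roomi[y5][x5] = v : Python evaluates roomi[y5] (negative index from the end; IndexError if
-- out of range — excluded by Pre_, where this total form leaves the room unchanged), then
-- sets item x5 of that row.  pySetD is exact where the index is in range.
def pyWrite2 (room : List (List String)) (y x : Int) (v : String) : List (List String) :=
  match PySem.List.pyGet? room y with
  | none => room
  | some row => PySem.List.pySetD room y (PySem.List.pySetD row x v)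

-- one row of A's scan: 'for j, cell in enumerate(rows)' reads the (possibly already mutated)
-- current room, so the fold carries the room state; indices produced by enumerate are always
-- in range, so getD is exact.  'j in range(x5-1, x5+2)' is the bounds test x5-1 ≤ j < x5+2.
def cnInner (x5 y5 : Int) (i : Nat) (s : Int × List (List String)) : Int × List (List String) :=
  (List.range (s.2.getD i []).length).foldl
    (fun t (j : Nat) =>
      if x5 - 1 ≤ (j : Int) ∧ (j : Int) < x5 + 2 then
        if (t.2.getD i []).getD j "" = "x" then
          (t.1 + 1, pyWrite2 t.2 y5 x5 (PySem.Int.toStr (t.1 + 1)))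
        else t
      else t) s

-- str(int(num)) = str(num) for the int accumulator num
def count_ninjas (x5 : Int) (y5 : Int) (roomi : List (List String)) : String :=
  PySem.Int.toStr
    (((List.range roomi.length).foldl
      (fun s (i : Nat) => if y5 - 1 ≤ (i : Int) ∧ (i : Int) < y5 + 2 then cnInner x5 y5 i s else s)
      ((0 : Int), roomi)).1)

-- ===== PORT B =====
-- '0 <= i < len(roomi) and 0 <= j < len(roomi[i]) and roomi[i][j] == "x"': under the guards the
-- indices are valid non-negative ints, so getD with toNat is exact (false short-circuits match).
def altHit (roomi : List (List String)) (i j : Int) : Bool :=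
  decide (0 ≤ i) && decide (i < (roomi.length : Int)) &&
  (decide (0 ≤ j) && decide (j < ((roomi.getD i.toNat []).length : Int)) &&
    ((roomi.getD i.toNat []).getD j.toNat "" == "x"))

def count_ninjas_alt (x5 : Int) (y5 : Int) (roomi : List (List String)) : String :=
  PySem.Int.toStr
    (([-1, 0, 1] : List Int).foldl (fun acc dy =>
      ([-1, 0, 1] : List Int).foldl (fun acc2 dx =>
        if altHit roomi (y5 + dy) (x5 + dx) then acc2 + 1 else acc2) acc) 0)

-- ===== PRECONDITION & SPEC =====
-- A raises IndexError iff the 3x3 window around (x5, y5) contains an 'x' (which triggers the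
-- write roomi[y5][x5]) while (y5, x5) is not a valid index.  Pre_ admits every other input:
-- either the selected tile is a valid NON-NEGATIVE index (negative in-range indices, where
-- A's write silently wraps to the other side of the room, are also excluded: there A's value
-- is an accident of Python wraparound — see cites), or the window contains no ninja at all
-- (then A never writes and returns '0' whatever x5, y5 are).
def Pre_count_ninjas (x5 : Int) (y5 : Int) (roomi : List (List String)) : Prop :=
  (0 ≤ y5 ∧ y5 < (roomi.length : Int) ∧ 0 ≤ x5 ∧ x5 < ((roomi.getD y5.toNat []).length : Int))
  ∨ (∀ i ∈ List.range roomi.length, ∀ j ∈ List.range (roomi.getD i []).length,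
      (y5 - 1 ≤ (i : Int) ∧ (i : Int) < y5 + 2 ∧ x5 - 1 ≤ (j : Int) ∧ (j : Int) < x5 + 2) →
      (roomi.getD i []).getD j "" ≠ "x")
instance (x5 : Int) (y5 : Int) (roomi : List (List String)) : Decidable (Pre_count_ninjas x5 y5 roomi) := by
  unfold Pre_count_ninjas; infer_instance

def pvWitness_count_ninjas : Int × Int × List (List String) := (0, 0, [["."]])

-- When the selected tile itself holds 'x' and an earlier-in-scan-order cell of its 3x3 window
-- (one of the three cells above it or the one to its left, all indices in range) also holds
-- 'x', A has already overwritten the selected tile with the running count before reading it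
-- and so returns a count omitting the selected tile's ninja; B returns the full window count,
-- which is what A's docstring promises ('if it does, it counts that one as well').
def D_count_ninjas (x5 : Int) (y5 : Int) (roomi : List (List String)) : Prop :=
  ∃ p ∈ [(y5-1,x5-1),(y5-1,x5),(y5-1,x5+1),(y5,x5-1)],
    0 ≤ min p.1 (min p.2 x5) ∧
    (roomi.getD p.1.toNat []).getD p.2.toNat "" = "x" ∧
    (roomi.getD y5.toNat []).getD x5.toNat "" = "x"
instance (x5 : Int) (y5 : Int) (roomi : List (List String)) : Decidable (D_count_ninjas x5 y5 roomi) := by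
  unfold D_count_ninjas; infer_instance

def Spec_count_ninjas (x5 : Int) (y5 : Int) (roomi : List (List String)) (out : String) : Prop :=
  ¬ D_count_ninjas x5 y5 roomi → out = count_ninjas_alt x5 y5 roomi
instance (x5 : Int) (y5 : Int) (roomi : List (List String)) (out : String) : Decidable (Spec_count_ninjas x5 y5 roomi out) := by
  unfold Spec_count_ninjas; infer_instance

def pvDiffWitness_count_ninjas : Int × Int × List (List String) :=
  (1, 1, [["x", ".", "."], [".", "x", "."], [".", ".", "."]])
def pvDiffWitnessOut_count_ninjas : String × String := ("1", "2")

-- ===== CLAIM (what is proved, stated in full; the proofs are below) =====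
def Claim_unchanged_count_ninjas : Prop := ∀ (x5 : Int) (y5 : Int) (roomi : List (List String)), Dom_count_ninjas x5 y5 roomi → Pre_count_ninjas x5 y5 roomi → Spec_count_ninjas x5 y5 roomi (count_ninjas x5 y5 roomi)
def Claim_changed_count_ninjas : Prop := Dom_count_ninjas (pvDiffWitness_count_ninjas.1) (pvDiffWitness_count_ninjas.2.1) (pvDiffWitness_count_ninjas.2.2) ∧ Pre_count_ninjas (pvDiffWitness_count_ninjas.1) (pvDiffWitness_count_ninjas.2.1) (pvDiffWitness_count_ninjas.2.2) ∧ D_count_ninjas (pvDiffWitness_count_ninjas.1) (pvDiffWitness_count_ninjas.2.1) (pvDiffWitness_count_ninjas.2.2) ∧ count_ninjas (pvDiffWitness_count_ninjas.1) (pvDiffWitness_count_ninjas.2.1) (pvDiffWitness_count_ninjas.2.2) = pvDiffWitnessOut_count_ninjas.1 ∧ count_ninjas_alt (pvDiffWitness_count_ninjas.1) (pvDiffWitness_count_ninjas.2.1) (pvDiffWitness_count_ninjas.2.2) = pvDiffWitnessOut_count_ninjas.2 ∧ pvDiffWitnessOut_count_ninjas.1 ≠ pvDiffWitnessOut_cou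nt_ninjas.2
def Claim_exact_count_ninjas : Prop := ∀ (x5 : Int) (y5 : Int) (roomi : List (List String)), Dom_count_ninjas x5 y5 roomi → Pre_count_ninjas x5 y5 roomi → D_count_ninjas x5 y5 roomi → count_ninjas x5 y5 roomi ≠ count_ninjas_alt x5 y5 roomi

-- ===== LEMMAS AND PROOFS =====

-- D_count_ninjas unfolded into the working form the proofs use: the selected tile is a valid
-- in-range reading 'x' and one of the four earlier-in-scan-order window offsets holds 'x'
theorem D_elim (x5 y5 : Int) (R : List (List String)) :
    D_count_ninjas x5 y5 R ↔
    (0 ≤ y5 ∧ 0 ≤ x5 ∧ (R.getD y5.toNat []).getD x5.toNat "" = "x" ∧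
     ∃ d ∈ [((-1 : Int), (-1 : Int)), (-1, 0), (-1, 1), (0, -1)],
       0 ≤ y5 + d.1 ∧ 0 ≤ x5 + d.2 ∧
       (R.getD (y5 + d.1).toNat []).getD (x5 + d.2).toNat "" = "x") := by
  unfold D_count_ninjas
  constructor
  · rintro ⟨p, hp, hmin, hcell, hcen⟩
    simp only [List.mem_cons, List.not_mem_nil, or_false] at hp
    rcases hp with rfl | rfl | rfl | rfl <;> simp only at hmin hcell
    · exact ⟨by omega, by omega, hcen, (-1, -1), by simp, by omega, by omega,
        by simpa [show y5 + -1 = y5 - 1 by ring, show x5 + -1 = x5 - 1 by ring] using hcell⟩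
    · exact ⟨by omega, by omega, hcen, (-1, 0), by simp, by omega, by omega,
        by simpa [show y5 + -1 = y5 - 1 by ring] using hcell⟩
    · exact ⟨by omega, by omega, hcen, (-1, 1), by simp, by omega, by omega,
        by simpa [show y5 + -1 = y5 - 1 by ring] using hcell⟩
    · exact ⟨by omega, by omega, hcen, (0, -1), by simp, by omega, by omega,
        by simpa [show x5 + -1 = x5 - 1 by ring] using hcell⟩
  · rintro ⟨hy, hx, hcen, d, hd, h1, h2, hcell⟩
    simp only [List.mem_cons, List.not_mem_nil, or_false] at hd
    rcases hd with rfl | rfl | rfl | rfl <;> simp only at h1 h2 hcell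
    · exact ⟨(y5-1, x5-1), by simp, by simp only []; omega,
        by simpa [show y5 + -1 = y5 - 1 by ring, show x5 + -1 = x5 - 1 by ring] using hcell, hcen⟩
    · exact ⟨(y5-1, x5), by simp, by simp only []; omega,
        by simpa [show y5 + -1 = y5 - 1 by ring] using hcell, hcen⟩
    · exact ⟨(y5-1, x5+1), by simp, by simp only []; omega,
        by simpa [show y5 + -1 = y5 - 1 by ring] using hcell, hcen⟩
    · exact ⟨(y5, x5-1), by simp, by simp only []; omega,
        by simpa [show x5 + -1 = x5 - 1 by ring] using hcell, hcen⟩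

-- window-column prefix count of a single (original) row
def rCnt (x5 : Int) (row : List String) : Nat → Int
  | 0 => 0
  | k+1 => rCnt x5 row k +
      (if (x5 - 1 ≤ (k : Int) ∧ (k : Int) < x5 + 2) ∧ row.getD k "" = "x" then 1 else 0)

-- window count of the first m (original) rows
def rowsCnt (x5 y5 : Int) (R : List (List String)) : Nat → Int
  | 0 => 0
  | m+1 => rowsCnt x5 y5 R m +
      (if y5 - 1 ≤ (m : Int) ∧ (m : Int) < y5 + 2
       then rCnt x5 (R.getD m []) (R.getD m []).length else 0)

-- the room during A's scan: original, or original with the centre overwritten by a non-"x" value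
def RoomInv (R : List (List String)) (Y X : Nat) (num : Int) (room : List (List String)) : Prop :=
  (num = 0 ∧ room = R) ∨
  (1 ≤ num ∧ ∃ v, v ≠ "x" ∧ room = R.set Y ((R.getD Y []).set X v))

-- count "before the centre" in scan order
def beforeC (X Y : Nat) (R : List (List String)) : Int :=
  rowsCnt (X : Int) (Y : Int) R Y + rCnt (X : Int) (R.getD Y []) X

-- per-cell indicators used to relate B's nine probes to the row-major counts
def cind (row : List String) (b : Int) (k : Nat) : Int :=
  if 0 ≤ b ∧ b < (k : Int) ∧ row.getD b.toNat "" = "x" then 1 else 0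
def rind (x5 : Int) (R : List (List String)) (b : Int) (m : Nat) : Int :=
  if 0 ≤ b ∧ b < (m : Int)
  then rCnt x5 (R.getD b.toNat []) (R.getD b.toNat []).length else 0

theorem rCnt_nonneg (x5 : Int) (row : List String) (k : Nat) : 0 ≤ rCnt x5 row k := by
  induction k with
  | zero => simp [rCnt]
  | succ k ih => simp only [rCnt]; split <;> omega

theorem rCnt_mono (x5 : Int) (row : List String) {k k' : Nat} (h : k ≤ k') :
    rCnt x5 row k ≤ rCnt x5 row k' := by
  induction k' with
  | zero => have hk : k = 0 := Nat.le_zero.mp h; subst hk; exact le_refl _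
  | succ k' ih =>
    rcases Nat.lt_or_ge k (k'+1) with h' | h'
    · have := ih (by omega)
      simp only [rCnt]; split <;> omega
    · have : k = k' + 1 := by omega
      subst this; exact le_refl _

theorem rowsCnt_nonneg (x5 y5 : Int) (R : List (List String)) (m : Nat) :
    0 ≤ rowsCnt x5 y5 R m := by
  induction m with
  | zero => simp [rowsCnt]
  | succ m ih =>
    have := rCnt_nonneg x5 (R.getD m []) (R.getD m []).length
    simp only [rowsCnt]; split <;> omega

theorem rowsCnt_mono (x5 y5 : Int) (R : List (List String)) {m m' : Nat} (h : m ≤ m') :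
    rowsCnt x5 y5 R m ≤ rowsCnt x5 y5 R m' := by
  induction m' with
  | zero => have hm : m = 0 := Nat.le_zero.mp h; subst hm; exact le_refl _
  | succ m' ih =>
    rcases Nat.lt_or_ge m (m'+1) with h' | h'
    · have h1 := ih (by omega)
      have h2 := rCnt_nonneg x5 (R.getD m' []) (R.getD m' []).length
      simp only [rowsCnt]; split <;> omega
    · have : m = m' + 1 := by omega
      subst this; exact le_refl _

-- every character str(n) produces comes from Nat.digitChar or is '-'; none of those is 'x'
theorem digitChar_ne (m : Nat) : Nat.digitChar m ≠ 'x' := by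
  unfold Nat.digitChar
  rcases Nat.lt_or_ge m 16 with h | h
  · interval_cases m <;> decide
  · rw [if_neg (by omega), if_neg (by omega), if_neg (by omega), if_neg (by omega),
      if_neg (by omega), if_neg (by omega), if_neg (by omega), if_neg (by omega),
      if_neg (by omega), if_neg (by omega), if_neg (by omega), if_neg (by omega),
      if_neg (by omega), if_neg (by omega), if_neg (by omega), if_neg (by omega)]
    decide

theorem toDigitsCore_ne (b : Nat) : ∀ (f n : Nat) (acc : List Char),
    (∀ c ∈ acc, c ≠ 'x') → ∀ c ∈ Nat.toDigitsCore b f n acc, c ≠ 'x' := by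
  intro f
  induction f with
  | zero => intro n acc hacc c hc; exact hacc c hc
  | succ f ih =>
    intro n acc hacc c hc
    simp only [Nat.toDigitsCore] at hc
    by_cases h : n / b = 0
    · rw [if_pos h] at hc
      rcases List.mem_cons.mp hc with h1 | h1
      · rw [h1]; exact digitChar_ne _
      · exact hacc c h1
    · rw [if_neg h] at hc
      refine ih (n / b) (Nat.digitChar (n % b) :: acc) ?_ c hc
      intro c' hc'
      rcases List.mem_cons.mp hc' with h1 | h1
      · rw [h1]; exact digitChar_ne _
      · exact hacc c' h1

theorem toStr_ne_x (n : Int) : PySem.Int.toStr n ≠ "x" := by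
  intro h
  have h2 : PySem.Int.toChars n = ['x'] := by
    have h3 := congrArg String.toList h
    rwa [PySem.Int.toList_toStr] at h3
  unfold PySem.Int.toChars at h2
  by_cases hn : n < 0
  · rw [if_pos hn] at h2
    have : '-' = 'x' := by injection h2
    exact absurd this (by decide)
  · rw [if_neg hn] at h2
    have hx : 'x' ∈ Nat.toDigits 10 n.toNat := by rw [h2]; exact List.mem_singleton.mpr rfl
    unfold Nat.toDigits at hx
    exact toDigitsCore_ne 10 _ _ [] (by simp) 'x' hx rfl

theorem toStr_injOn_small {a b : Int} (ha0 : 0 ≤ a) (hb : b ≤ 9) (hab : a < b) :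
    PySem.Int.toStr a ≠ PySem.Int.toStr b := by
  have ha9 : a ≤ 8 := by omega
  have hb1 : 1 ≤ b := by omega
  interval_cases a <;> interval_cases b <;> decide

-- ---------- characterisation of B ----------

theorem cind_zero (row : List String) (b : Int) : cind row b 0 = 0 := by
  unfold cind
  rw [if_neg]
  rintro ⟨h1, h2, -⟩
  push_cast at h2
  omega

theorem cind_succ (row : List String) (b : Int) (k : Nat) :
    cind row b (k+1) = cind row b k + (if b = (k : Int) ∧ row.getD k "" = "x" then 1 else 0) := by
  unfold cind
  by_cases hcell : row.getD k "" = "x" <;> by_cases hb : b = (k : Int)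
  · subst hb
    simp only [Int.toNat_natCast, eq_self_iff_true, true_and]
    rw [if_pos ⟨by omega, by push_cast; omega, hcell⟩,
      if_neg (by rintro ⟨-, h2, -⟩; omega),
      if_pos hcell]
    norm_num
  · rw [if_neg (show ¬(b = (k : Int) ∧ row.getD k "" = "x") from fun hh => hb hh.1), add_zero]
    refine if_congr (Iff.intro ?_ ?_) rfl rfl
    · rintro ⟨h1, h2, h3⟩
      refine ⟨h1, ?_, h3⟩
      push_cast at h2 ⊢; omega
    · rintro ⟨h1, h2, h3⟩
      refine ⟨h1, ?_, h3⟩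
      push_cast at h2 ⊢; omega
  · subst hb
    simp only [Int.toNat_natCast, eq_self_iff_true, true_and]
    rw [if_neg (by rintro ⟨-, -, h3⟩; exact hcell h3),
      if_neg (by rintro ⟨-, -, h3⟩; exact hcell h3),
      if_neg hcell]
    norm_num
  · rw [if_neg (show ¬(b = (k : Int) ∧ row.getD k "" = "x") from fun hh => hb hh.1), add_zero]
    refine if_congr (Iff.intro ?_ ?_) rfl rfl
    · rintro ⟨h1, h2, h3⟩
      refine ⟨h1, ?_, h3⟩
      push_cast at h2 ⊢; omega
    · rintro ⟨h1, h2, h3⟩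
      refine ⟨h1, ?_, h3⟩
      push_cast at h2 ⊢; omega

theorem rCnt_eq_cind (x5 : Int) (row : List String) (k : Nat) :
    rCnt x5 row k = cind row (x5-1) k + cind row x5 k + cind row (x5+1) k := by
  induction k with
  | zero => simp [rCnt, cind_zero]
  | succ k ih =>
    simp only [rCnt, cind_succ, ih]
    have step : (if (x5 - 1 ≤ (k : Int) ∧ (k : Int) < x5 + 2) ∧ row.getD k "" = "x" then (1:Int) else 0)
        = (if x5 - 1 = (k : Int) ∧ row.getD k "" = "x" then 1 else 0)
        + (if x5 = (k : Int) ∧ row.getD k "" = "x" then 1 else 0)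
        + (if x5 + 1 = (k : Int) ∧ row.getD k "" = "x" then 1 else 0) := by
      by_cases hcell : row.getD k "" = "x"
      · simp only [hcell, and_true]
        split_ifs <;> omega
      · simp only [hcell, and_false, if_false]
        norm_num
    rw [step]; ring

theorem rind_zero (x5 : Int) (R : List (List String)) (b : Int) : rind x5 R b 0 = 0 := by
  unfold rind
  rw [if_neg]
  rintro ⟨h1, h2⟩
  push_cast at h2
  omega

theorem rind_succ (x5 : Int) (R : List (List String)) (b : Int) (m : Nat) :
    rind x5 R b (m+1) = rind x5 R b m +
      (if b = (m : Int) then rCnt x5 (R.getD m []) (R.getD m []).length else 0) := by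
  unfold rind
  by_cases hb : b = (m : Int)
  · subst hb
    rw [if_pos ⟨by omega, by push_cast; omega⟩,
      if_neg (by rintro ⟨-, h2⟩; omega), if_pos rfl]
    simp [Int.toNat_natCast]
  · rw [if_neg hb, add_zero]
    refine if_congr (Iff.intro ?_ ?_) rfl rfl
    · rintro ⟨h1, h2⟩
      refine ⟨h1, ?_⟩
      push_cast at h2 ⊢; omega
    · rintro ⟨h1, h2⟩
      refine ⟨h1, ?_⟩
      push_cast at h2 ⊢; omega

theorem rowsCnt_eq_rind (x5 y5 : Int) (R : List (List String)) (m : Nat) :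
    rowsCnt x5 y5 R m = rind x5 R (y5-1) m + rind x5 R y5 m + rind x5 R (y5+1) m := by
  induction m with
  | zero => simp [rowsCnt, rind_zero]
  | succ m ih =>
    simp only [rowsCnt, rind_succ, ih]
    have step : (if y5 - 1 ≤ (m : Int) ∧ (m : Int) < y5 + 2
          then rCnt x5 (R.getD m []) (R.getD m []).length else 0)
        = (if y5 - 1 = (m : Int) then rCnt x5 (R.getD m []) (R.getD m []).length else 0)
        + (if y5 = (m : Int) then rCnt x5 (R.getD m []) (R.getD m []).length else 0)
        + (if y5 + 1 = (m : Int) then rCnt x5 (R.getD m []) (R.getD m []).length else 0) := by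
      split_ifs <;> first | omega | linarith
    rw [step]; ring

theorem altHit_step (R : List (List String)) (i j : Int) (a : Int) :
    (if altHit R i j then a + 1 else a) =
    a + (if 0 ≤ i ∧ i < (R.length : Int)
         then cind (R.getD i.toNat []) j (R.getD i.toNat []).length else 0) := by
  by_cases h1 : 0 ≤ i <;> by_cases h2 : i < (R.length : Int) <;>
    by_cases h3 : 0 ≤ j <;> by_cases h4 : j < ((R.getD i.toNat []).length : Int) <;>
    by_cases h5 : (R.getD i.toNat []).getD j.toNat "" = "x" <;>
    simp [altHit, cind, h1, h2, h3, h4, h5]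
  all_goals first | omega | (split_ifs <;> omega)

theorem ite_sum3 (c : Prop) [inst : Decidable c] (t1 t2 t3 : Int) :
    (if c then t1 + t2 + t3 else 0) =
    (if c then t1 else 0) + (if c then t2 else 0) + (if c then t3 else 0) := by
  split_ifs <;> ring

theorem B_char (x5 y5 : Int) (R : List (List String)) :
    count_ninjas_alt x5 y5 R = PySem.Int.toStr (rowsCnt x5 y5 R R.length) := by
  unfold count_ninjas_alt
  simp only [List.foldl_cons, List.foldl_nil, altHit_step]
  rw [rowsCnt_eq_rind]
  unfold rind
  simp only [rCnt_eq_cind, ite_sum3]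
  have e1 : y5 + -1 = y5 - 1 := by ring
  have e2 : x5 + -1 = x5 - 1 := by ring
  have e3 : y5 + 0 = y5 := by ring
  have e4 : x5 + 0 = x5 := by ring
  rw [e1, e2, e3, e4]
  congr 1
  ring

theorem cind_le_one (row : List String) (b : Int) (k : Nat) : cind row b k ≤ 1 := by
  unfold cind; split <;> omega

theorem rind_le_three (x5 : Int) (R : List (List String)) (b : Int) (m : Nat) :
    rind x5 R b m ≤ 3 := by
  unfold rind
  split
  · rw [rCnt_eq_cind]
    have h1 := cind_le_one (R.getD b.toNat []) (x5-1) (R.getD b.toNat []).length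
    have h2 := cind_le_one (R.getD b.toNat []) x5 (R.getD b.toNat []).length
    have h3 := cind_le_one (R.getD b.toNat []) (x5+1) (R.getD b.toNat []).length
    omega
  · omega

theorem wcnt_le_nine (x5 y5 : Int) (R : List (List String)) :
    rowsCnt x5 y5 R R.length ≤ 9 := by
  rw [rowsCnt_eq_rind]
  have h1 := rind_le_three x5 R (y5-1) R.length
  have h2 := rind_le_three x5 R y5 R.length
  have h3 := rind_le_three x5 R (y5+1) R.length
  omega

-- ---------- characterisation of A ----------

theorem getD_set' {α : Type} (l : List α) (n : Nat) (a : α) (m : Nat) (d : α) :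
    (l.set n a).getD m d = if m = n ∧ n < l.length then a else l.getD m d := by
  by_cases h : n = m
  · subst h
    by_cases hl : n < l.length
    · simp [List.getD_eq_getElem?_getD, List.getElem?_set, hl]
    · rw [if_neg (by rintro ⟨-, h2⟩; exact hl h2)]
      rw [List.set_eq_of_length_le (by omega)]
  · rw [if_neg (by rintro ⟨h1, -⟩; exact h h1.symm)]
    simp [List.getD_eq_getElem?_getD, List.getElem?_set, h]

theorem roomInv_len {R : List (List String)} {Y X : Nat} {num : Int} {room : List (List String)}
    (h : RoomInv R Y X num room) : room.length = R.length := by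
  rcases h with ⟨-, rfl⟩ | ⟨-, v, -, rfl⟩ <;> simp

theorem roomInv_rowlen {R : List (List String)} {Y X : Nat} {num : Int} {room : List (List String)}
    (h : RoomInv R Y X num room) (i : Nat) : (room.getD i []).length = (R.getD i []).length := by
  rcases h with ⟨-, rfl⟩ | ⟨-, v, -, rfl⟩
  · rfl
  · rw [getD_set']
    split
    · rename_i hc
      obtain ⟨rfl, -⟩ := hc
      simp
    · rfl

theorem roomInv_read {R : List (List String)} {Y X : Nat} {num : Int} {room : List (List String)}
    (h : RoomInv R Y X num room) {i j : Nat} (hne : i ≠ Y ∨ j ≠ X) :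
    (room.getD i []).getD j "" = (R.getD i []).getD j "" := by
  rcases h with ⟨-, rfl⟩ | ⟨-, v, -, rfl⟩
  · rfl
  · rw [getD_set']
    split
    · rename_i hc
      obtain ⟨rfl, -⟩ := hc
      rw [getD_set']
      rw [if_neg]
      rintro ⟨rfl, -⟩
      rcases hne with h | h <;> exact h rfl
    · rfl

theorem roomInv_read_center {R : List (List String)} {Y X : Nat} {num : Int} {room : List (List String)}
    (h : RoomInv R Y X num room) (hY : Y < R.length) (hX : X < (R.getD Y []).length)
    (h1 : 1 ≤ num) : (room.getD Y []).getD X "" ≠ "x" := by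
  rcases h with ⟨h0, -⟩ | ⟨-, v, hv, rfl⟩
  · omega
  · rw [getD_set', if_pos ⟨rfl, hY⟩, getD_set', if_pos ⟨rfl, hX⟩]
    exact hv

theorem roomInv_write {R : List (List String)} {Y X : Nat} {num : Int} {room : List (List String)}
    (h : RoomInv R Y X num room) (hY : Y < R.length) (hX : X < (R.getD Y []).length)
    {num' : Int} (h1 : 1 ≤ num') :
    RoomInv R Y X num' (pyWrite2 room (Y : Int) (X : Int) (PySem.Int.toStr num')) := by
  have hYr : Y < room.length := by rw [roomInv_len h]; exact hY
  have hget : PySem.List.pyGet? room ((Y : Nat) : Int) = some (room.getD Y []) := by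
    rw [PySem.List.pyGet?_natCast, List.getElem?_eq_getElem hYr, List.getD_eq_getElem _ _ hYr]
  unfold pyWrite2
  rw [hget]
  simp only [PySem.List.pySetD_natCast]
  rcases h with ⟨-, rfl⟩ | ⟨-, v, -, rfl⟩
  · exact Or.inr ⟨h1, PySem.Int.toStr num', toStr_ne_x num', rfl⟩
  · refine Or.inr ⟨h1, PySem.Int.toStr num', toStr_ne_x num', ?_⟩
    rw [getD_set', if_pos ⟨rfl, hY⟩, List.set_set, List.set_set]

theorem inner_ne (R : List (List String)) (Y X : Nat)
    (hY : Y < R.length) (hX : X < (R.getD Y []).length) (i : Nat) (hi : i ≠ Y) :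
    ∀ (k : Nat) (num : Int) (room : List (List String)), RoomInv R Y X num room → 0 ≤ num →
    ∃ room', (List.range k).foldl
        (fun t (j : Nat) =>
          if (X : Int) - 1 ≤ (j : Int) ∧ (j : Int) < (X : Int) + 2 then
            if (t.2.getD i []).getD j "" = "x" then
              (t.1 + 1, pyWrite2 t.2 (Y : Int) (X : Int) (PySem.Int.toStr (t.1 + 1)))
            else t
          else t) (num, room)
      = (num + rCnt (X : Int) (R.getD i []) k, room')
      ∧ RoomInv R Y X (num + rCnt (X : Int) (R.getD i []) k) room' := by
  intro k num room hInv hnum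
  induction k with
  | zero => exact ⟨room, by simp [rCnt], by simpa [rCnt] using hInv⟩
  | succ k ih =>
    obtain ⟨room', heq, hinv'⟩ := ih
    rw [List.range_succ, List.foldl_append, heq]
    simp only [List.foldl_cons, List.foldl_nil]
    by_cases hwin : (X : Int) - 1 ≤ (k : Int) ∧ (k : Int) < (X : Int) + 2
    · rw [if_pos hwin]
      have hread : (room'.getD i []).getD k "" = (R.getD i []).getD k "" :=
        roomInv_read hinv' (Or.inl hi)
      by_cases hcell : (R.getD i []).getD k "" = "x"
      · rw [if_pos (by rw [hread]; exact hcell)]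
        have hc : rCnt (X : Int) (R.getD i []) (k+1) = rCnt (X : Int) (R.getD i []) k + 1 := by
          simp only [rCnt]; rw [if_pos ⟨hwin, hcell⟩]
        have hpos : (1:Int) ≤ num + rCnt (X : Int) (R.getD i []) k + 1 := by
          have := rCnt_nonneg (X : Int) (R.getD i []) k
          omega
        have hwr := roomInv_write hinv' hY hX hpos
        have hval : num + rCnt (X : Int) (R.getD i []) (k+1)
            = num + rCnt (X : Int) (R.getD i []) k + 1 := by rw [hc]; ring
        exact ⟨_, by rw [hval], by rw [hval]; exact hwr⟩
      · rw [if_neg (by rw [hread]; exact hcell)]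
        have hc : rCnt (X : Int) (R.getD i []) (k+1) = rCnt (X : Int) (R.getD i []) k := by
          simp only [rCnt]; rw [if_neg (by rintro ⟨-, h⟩; exact hcell h)]; ring
        rw [hc]
        exact ⟨room', rfl, hinv'⟩
    · rw [if_neg hwin]
      have hc : rCnt (X : Int) (R.getD i []) (k+1) = rCnt (X : Int) (R.getD i []) k := by
        simp only [rCnt]; rw [if_neg (by rintro ⟨h, -⟩; exact hwin h)]; ring
      rw [hc]
      exact ⟨room', rfl, hinv'⟩

def corrC (X Y : Nat) (R : List (List String)) (C : Int) (k : Nat) : Int :=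
  if X < k ∧ (R.getD Y []).getD X "" = "x" ∧ 1 ≤ C + rCnt (X : Int) (R.getD Y []) X then 1 else 0

theorem rCnt_center_succ (R : List (List String)) (Y X : Nat)
    (hcx : (R.getD Y []).getD X "" = "x") :
    rCnt (X : Int) (R.getD Y []) (X+1) = rCnt (X : Int) (R.getD Y []) X + 1 := by
  simp only [rCnt]
  rw [if_pos ⟨⟨by omega, by omega⟩, hcx⟩]

theorem numC_nonneg (R : List (List String)) (Y X : Nat) (C : Int) (hC : 0 ≤ C) (k : Nat) :
    0 ≤ C + rCnt (X : Int) (R.getD Y []) k - corrC X Y R C k := by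
  unfold corrC
  split_ifs with h
  · obtain ⟨hk, hcx, hb⟩ := h
    have h1 : rCnt (X : Int) (R.getD Y []) (X+1) ≤ rCnt (X : Int) (R.getD Y []) k :=
      rCnt_mono _ _ (by omega)
    have h2 := rCnt_center_succ R Y X hcx
    linarith
  · have := rCnt_nonneg (X : Int) (R.getD Y []) k
    linarith

theorem inner_center (R : List (List String)) (Y X : Nat)
    (hY : Y < R.length) (hX : X < (R.getD Y []).length) :
    ∀ (k : Nat) (C : Int) (room : List (List String)), RoomInv R Y X C room → 0 ≤ C →
    ∃ room', (List.range k).foldl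
        (fun t (j : Nat) =>
          if (X : Int) - 1 ≤ (j : Int) ∧ (j : Int) < (X : Int) + 2 then
            if (t.2.getD Y []).getD j "" = "x" then
              (t.1 + 1, pyWrite2 t.2 (Y : Int) (X : Int) (PySem.Int.toStr (t.1 + 1)))
            else t
          else t) (C, room)
      = (C + rCnt (X : Int) (R.getD Y []) k - corrC X Y R C k, room')
      ∧ RoomInv R Y X (C + rCnt (X : Int) (R.getD Y []) k - corrC X Y R C k) room' := by
  intro k C room hInv hC
  induction k with
  | zero =>
    refine ⟨room, ?_, ?_⟩
    · simp [rCnt, corrC]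
    · simpa [rCnt, corrC] using hInv
  | succ k ih =>
    obtain ⟨room', heq, hinv'⟩ := ih
    rw [List.range_succ, List.foldl_append, heq]
    simp only [List.foldl_cons, List.foldl_nil]
    set nk := C + rCnt (X : Int) (R.getD Y []) k - corrC X Y R C k with hnk
    have hnk0 : 0 ≤ nk := numC_nonneg R Y X C hC k
    by_cases hwin : (X : Int) - 1 ≤ (k : Int) ∧ (k : Int) < (X : Int) + 2
    · rw [if_pos hwin]
      by_cases hkX : k = X
      · rw [hkX] at hwin hnk ⊢
        have hcorrk : corrC X Y R C X = 0 := by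
          unfold corrC; rw [if_neg]; rintro ⟨h1, -⟩; omega
        rcases hinv' with ⟨h0, hroom⟩ | ⟨h1, v, hv, hroom⟩
        · rw [hroom]
          by_cases hcx : (R.getD Y []).getD X "" = "x"
          · rw [if_pos hcx]
            have hb0 : C + rCnt (X : Int) (R.getD Y []) X = 0 := by
              have h0' := h0
              rw [hnk, hcorrk] at h0'
              omega
            have hstep := rCnt_center_succ R Y X hcx
            have hc1 : corrC X Y R C (X+1) = 0 := by
              unfold corrC; rw [if_neg]; rintro ⟨-, -, hb⟩; omega
            have hval : C + rCnt (X : Int) (R.getD Y []) (X+1) - corrC X Y R C (X+1) = nk + 1 := by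
              rw [hstep, hc1, hnk, hcorrk]; try ring
            have hinvR : RoomInv R Y X nk R := Or.inl ⟨h0, rfl⟩
            have hwr := roomInv_write hinvR hY hX (show (1:Int) ≤ nk + 1 by omega)
            exact ⟨_, by rw [hval], by rw [hval]; exact hwr⟩
          · rw [if_neg hcx]
            have hstep : rCnt (X : Int) (R.getD Y []) (X+1) = rCnt (X : Int) (R.getD Y []) X := by
              simp only [rCnt]; rw [if_neg (by rintro ⟨-, h⟩; exact hcx h)]; ring
            have hc1 : corrC X Y R C (X+1) = 0 := by
              unfold corrC; rw [if_neg]; rintro ⟨-, h, -⟩; exact hcx h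
            have hval : C + rCnt (X : Int) (R.getD Y []) (X+1) - corrC X Y R C (X+1) = nk := by
              rw [hstep, hc1, hnk, hcorrk]; try ring
            exact ⟨R, by rw [hval], by rw [hval]; exact Or.inl ⟨h0, rfl⟩⟩
        · have hinv2 : RoomInv R Y X nk room' := Or.inr ⟨h1, v, hv, hroom⟩
          have hread := roomInv_read_center hinv2 hY hX h1
          rw [if_neg hread]
          have hb1 : (1:Int) ≤ C + rCnt (X : Int) (R.getD Y []) X := by
            have h1' := h1
            rw [hnk, hcorrk] at h1'
            omega
          by_cases hcx : (R.getD Y []).getD X "" = "x"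
          · have hstep := rCnt_center_succ R Y X hcx
            have hc1 : corrC X Y R C (X+1) = 1 := by
              unfold corrC; rw [if_pos ⟨by omega, hcx, hb1⟩]
            have hval : C + rCnt (X : Int) (R.getD Y []) (X+1) - corrC X Y R C (X+1) = nk := by
              rw [hstep, hc1, hnk, hcorrk]; try ring
            exact ⟨room', by rw [hval], by rw [hval]; exact hinv2⟩
          · have hstep : rCnt (X : Int) (R.getD Y []) (X+1) = rCnt (X : Int) (R.getD Y []) X := by
              simp only [rCnt]; rw [if_neg (by rintro ⟨-, h⟩; exact hcx h)]; ring
            have hc1 : corrC X Y R C (X+1) = 0 := by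
              unfold corrC; rw [if_neg]; rintro ⟨-, h, -⟩; exact hcx h
            have hval : C + rCnt (X : Int) (R.getD Y []) (X+1) - corrC X Y R C (X+1) = nk := by
              rw [hstep, hc1, hnk, hcorrk]; try ring
            exact ⟨room', by rw [hval], by rw [hval]; exact hinv2⟩
      · have hread : (room'.getD Y []).getD k "" = (R.getD Y []).getD k "" :=
          roomInv_read hinv' (Or.inr hkX)
        have hcorr : corrC X Y R C (k+1) = corrC X Y R C k := by
          unfold corrC
          refine if_congr (Iff.intro ?_ ?_) rfl rfl
          · rintro ⟨h1, h2, h3⟩; exact ⟨by omega, h2, h3⟩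
          · rintro ⟨h1, h2, h3⟩; exact ⟨by omega, h2, h3⟩
        by_cases hcell : (R.getD Y []).getD k "" = "x"
        · rw [if_pos (by rw [hread]; exact hcell)]
          have hstep : rCnt (X : Int) (R.getD Y []) (k+1) = rCnt (X : Int) (R.getD Y []) k + 1 := by
            simp only [rCnt]; rw [if_pos ⟨hwin, hcell⟩]
          have hwr := roomInv_write hinv' hY hX (show (1:Int) ≤ nk + 1 by omega)
          have hval : C + rCnt (X : Int) (R.getD Y []) (k+1) - corrC X Y R C (k+1) = nk + 1 := by
            rw [hstep, hcorr, hnk]; try ring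
          exact ⟨_, by rw [hval], by rw [hval]; exact hwr⟩
        · rw [if_neg (by rw [hread]; exact hcell)]
          have hstep : rCnt (X : Int) (R.getD Y []) (k+1) = rCnt (X : Int) (R.getD Y []) k := by
            simp only [rCnt]; rw [if_neg (by rintro ⟨-, h⟩; exact hcell h)]; ring
          have hval : C + rCnt (X : Int) (R.getD Y []) (k+1) - corrC X Y R C (k+1) = nk := by
            rw [hstep, hcorr, hnk]
          exact ⟨room', by rw [hval], by rw [hval]; exact hinv'⟩
    · rw [if_neg hwin]
      have hkX : k ≠ X := by intro h; subst h; exact hwin ⟨by omega, by omega⟩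
      have hstep : rCnt (X : Int) (R.getD Y []) (k+1) = rCnt (X : Int) (R.getD Y []) k := by
        simp only [rCnt]; rw [if_neg (by rintro ⟨h, -⟩; exact hwin h)]; ring
      have hcorr : corrC X Y R C (k+1) = corrC X Y R C k := by
        unfold corrC
        refine if_congr (Iff.intro ?_ ?_) rfl rfl
        · rintro ⟨h1, h2, h3⟩; exact ⟨by omega, h2, h3⟩
        · rintro ⟨h1, h2, h3⟩; exact ⟨by omega, h2, h3⟩
      have hval : C + rCnt (X : Int) (R.getD Y []) (k+1) - corrC X Y R C (k+1) = nk := by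
        rw [hstep, hcorr, hnk]
      exact ⟨room', by rw [hval], by rw [hval]; exact hinv'⟩

def corrO (X Y : Nat) (R : List (List String)) (m : Nat) : Int :=
  if Y < m ∧ (R.getD Y []).getD X "" = "x" ∧ 1 ≤ beforeC X Y R then 1 else 0

theorem numS_nonneg (R : List (List String)) (Y X : Nat)
    (hY : Y < R.length) (hX : X < (R.getD Y []).length) (m : Nat) :
    0 ≤ rowsCnt (X : Int) (Y : Int) R m - corrO X Y R m := by
  unfold corrO beforeC
  split_ifs with h
  · obtain ⟨hm, hcx, hb⟩ := h
    have h1 : rowsCnt (X : Int) (Y : Int) R (Y+1) ≤ rowsCnt (X : Int) (Y : Int) R m :=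
      rowsCnt_mono _ _ _ (by omega)
    have h2 : rowsCnt (X : Int) (Y : Int) R (Y+1) =
        rowsCnt (X : Int) (Y : Int) R Y + rCnt (X : Int) (R.getD Y []) (R.getD Y []).length := by
      simp only [rowsCnt]; rw [if_pos ⟨by omega, by omega⟩]
    have h3 : rCnt (X : Int) (R.getD Y []) (X+1) ≤ rCnt (X : Int) (R.getD Y []) (R.getD Y []).length :=
      rCnt_mono _ _ (by omega)
    have h4 := rCnt_center_succ R Y X hcx
    linarith
  · linarith [rowsCnt_nonneg (X : Int) (Y : Int) R m]

theorem outer_char (R : List (List String)) (Y X : Nat)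
    (hY : Y < R.length) (hX : X < (R.getD Y []).length) :
    ∀ (m : Nat),
    ∃ room', (List.range m).foldl
        (fun s (i : Nat) => if (Y : Int) - 1 ≤ (i : Int) ∧ (i : Int) < (Y : Int) + 2
                    then cnInner (X : Int) (Y : Int) i s else s)
        ((0 : Int), R)
      = (rowsCnt (X : Int) (Y : Int) R m - corrO X Y R m, room')
      ∧ RoomInv R Y X (rowsCnt (X : Int) (Y : Int) R m - corrO X Y R m) room' := by
  intro m
  induction m with
  | zero =>
    refine ⟨R, ?_, ?_⟩
    · simp [rowsCnt, corrO]
    · simp only [rowsCnt, corrO]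
      rw [if_neg (by rintro ⟨h, -⟩; omega)]
      exact Or.inl ⟨by ring, rfl⟩
  | succ m ih =>
    obtain ⟨room', heq, hinv'⟩ := ih
    rw [List.range_succ, List.foldl_append, heq]
    simp only [List.foldl_cons, List.foldl_nil]
    by_cases hwin : (Y : Int) - 1 ≤ (m : Int) ∧ (m : Int) < (Y : Int) + 2
    · rw [if_pos hwin]
      have hbound : ((room'.getD m [])).length = (R.getD m []).length := roomInv_rowlen hinv' m
      by_cases hmY : m = Y
      · have hcorrm : corrO X Y R Y = 0 := by
          unfold corrO; rw [if_neg]; rintro ⟨h, -⟩; omega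
        rw [hmY] at hbound hinv' ⊢
        rw [hcorrm, sub_zero] at hinv' ⊢
        obtain ⟨room'', heq2, hinv2⟩ := inner_center R Y X hY hX (R.getD Y []).length
          (rowsCnt (X : Int) (Y : Int) R Y) room' hinv' (rowsCnt_nonneg _ _ _ _)
        unfold cnInner
        rw [hbound]
        have hval : rowsCnt (X : Int) (Y : Int) R Y +
            rCnt (X : Int) (R.getD Y []) (R.getD Y []).length -
            corrC X Y R (rowsCnt (X : Int) (Y : Int) R Y) (R.getD Y []).length
            = rowsCnt (X : Int) (Y : Int) R (Y+1) - corrO X Y R (Y+1) := by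
          have hrs : rowsCnt (X : Int) (Y : Int) R (Y+1) = rowsCnt (X : Int) (Y : Int) R Y +
              rCnt (X : Int) (R.getD Y []) (R.getD Y []).length := by
            simp only [rowsCnt]; rw [if_pos ⟨by omega, by omega⟩]
          have hcc : corrC X Y R (rowsCnt (X : Int) (Y : Int) R Y) (R.getD Y []).length
              = corrO X Y R (Y+1) := by
            unfold corrC corrO beforeC
            refine if_congr (Iff.intro ?_ ?_) rfl rfl
            · rintro ⟨-, h2, h3⟩; exact ⟨by omega, h2, h3⟩
            · rintro ⟨-, h2, h3⟩; exact ⟨hX, h2, h3⟩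
          rw [hrs, hcc]; try ring
        exact ⟨room'', by rw [heq2, hval], hval ▸ hinv2⟩
      · have hnum : 0 ≤ rowsCnt (X : Int) (Y : Int) R m - corrO X Y R m :=
          numS_nonneg R Y X hY hX m
        obtain ⟨room'', heq2, hinv2⟩ := inner_ne R Y X hY hX m hmY (R.getD m []).length
          (rowsCnt (X : Int) (Y : Int) R m - corrO X Y R m) room' hinv' hnum
        unfold cnInner
        rw [hbound]
        have hval : rowsCnt (X : Int) (Y : Int) R m - corrO X Y R m +
            rCnt (X : Int) (R.getD m []) (R.getD m []).length
            = rowsCnt (X : Int) (Y : Int) R (m+1) - corrO X Y R (m+1) := by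
          have hrs : rowsCnt (X : Int) (Y : Int) R (m+1) = rowsCnt (X : Int) (Y : Int) R m +
              rCnt (X : Int) (R.getD m []) (R.getD m []).length := by
            simp only [rowsCnt]; rw [if_pos hwin]
          have hco : corrO X Y R (m+1) = corrO X Y R m := by
            unfold corrO
            refine if_congr (Iff.intro ?_ ?_) rfl rfl
            · rintro ⟨h1, h2, h3⟩; exact ⟨by omega, h2, h3⟩
            · rintro ⟨h1, h2, h3⟩; exact ⟨by omega, h2, h3⟩
          rw [hrs, hco]; ring
        exact ⟨room'', by rw [heq2, hval], hval ▸ hinv2⟩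
    · rw [if_neg hwin]
      have hmY : m ≠ Y := by intro h; subst h; exact hwin ⟨by omega, by omega⟩
      have hrs : rowsCnt (X : Int) (Y : Int) R (m+1) = rowsCnt (X : Int) (Y : Int) R m := by
        simp only [rowsCnt]; rw [if_neg hwin]; ring
      have hco : corrO X Y R (m+1) = corrO X Y R m := by
        unfold corrO
        refine if_congr (Iff.intro ?_ ?_) rfl rfl
        · rintro ⟨h1, h2, h3⟩; exact ⟨by omega, h2, h3⟩
        · rintro ⟨h1, h2, h3⟩; exact ⟨by omega, h2, h3⟩
      rw [hrs, hco]
      exact ⟨room', rfl, hinv'⟩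

theorem A_char (R : List (List String)) (Y X : Nat)
    (hY : Y < R.length) (hX : X < (R.getD Y []).length) :
    count_ninjas (X : Int) (Y : Int) R =
    PySem.Int.toStr (rowsCnt (X : Int) (Y : Int) R R.length -
      (if (R.getD Y []).getD X "" = "x" ∧ 1 ≤ beforeC X Y R then 1 else 0)) := by
  unfold count_ninjas
  obtain ⟨room', heq, -⟩ := outer_char R Y X hY hX R.length
  rw [heq]
  have h : corrO X Y R R.length = if (R.getD Y []).getD X "" = "x" ∧ 1 ≤ beforeC X Y R then 1 else 0 := by
    unfold corrO
    refine if_congr (Iff.intro ?_ ?_) rfl rfl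
    · rintro ⟨-, h2, h3⟩; exact ⟨h2, h3⟩
    · rintro ⟨h2, h3⟩; exact ⟨hY, h2, h3⟩
  rw [h]

-- ---------- the no-ninja-in-window case ----------

theorem inner_nox (R : List (List String)) (x5 y5 : Int) (i : Nat) (hi : i < R.length)
    (hwr : y5 - 1 ≤ (i : Int) ∧ (i : Int) < y5 + 2)
    (H : ∀ i' ∈ List.range R.length, ∀ j ∈ List.range (R.getD i' []).length,
      (y5 - 1 ≤ (i' : Int) ∧ (i' : Int) < y5 + 2 ∧ x5 - 1 ≤ (j : Int) ∧ (j : Int) < x5 + 2) →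
      (R.getD i' []).getD j "" ≠ "x") :
    ∀ k, k ≤ (R.getD i []).length →
    (List.range k).foldl
        (fun t (j : Nat) =>
          if x5 - 1 ≤ (j : Int) ∧ (j : Int) < x5 + 2 then
            if (t.2.getD i []).getD j "" = "x" then
              (t.1 + 1, pyWrite2 t.2 y5 x5 (PySem.Int.toStr (t.1 + 1)))
            else t
          else t) (0, R)
      = ((0 : Int), R) := by
  intro k
  induction k with
  | zero => intro _; rfl
  | succ k ih =>
    intro hk
    rw [List.range_succ, List.foldl_append, ih (by omega)]
    simp only [List.foldl_cons, List.foldl_nil]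
    by_cases hwin : x5 - 1 ≤ (k : Int) ∧ (k : Int) < x5 + 2
    · rw [if_pos hwin]
      rw [if_neg (H i (List.mem_range.mpr hi) k (List.mem_range.mpr (by omega))
        ⟨hwr.1, hwr.2, hwin.1, hwin.2⟩)]
    · rw [if_neg hwin]

theorem A_nox (x5 y5 : Int) (R : List (List String))
    (H : ∀ i ∈ List.range R.length, ∀ j ∈ List.range (R.getD i []).length,
      (y5 - 1 ≤ (i : Int) ∧ (i : Int) < y5 + 2 ∧ x5 - 1 ≤ (j : Int) ∧ (j : Int) < x5 + 2) →
      (R.getD i []).getD j "" ≠ "x") :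
    count_ninjas x5 y5 R = PySem.Int.toStr 0 := by
  unfold count_ninjas
  have main : ∀ m, m ≤ R.length →
      (List.range m).foldl
        (fun s (i : Nat) => if y5 - 1 ≤ (i : Int) ∧ (i : Int) < y5 + 2 then cnInner x5 y5 i s else s)
        ((0 : Int), R) = ((0 : Int), R) := by
    intro m
    induction m with
    | zero => intro _; rfl
    | succ m ih =>
      intro hm
      rw [List.range_succ, List.foldl_append, ih (by omega)]
      simp only [List.foldl_cons, List.foldl_nil]
      by_cases hwin : y5 - 1 ≤ (m : Int) ∧ (m : Int) < y5 + 2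
      · rw [if_pos hwin]
        unfold cnInner
        exact inner_nox R x5 y5 m (by omega) hwin H (R.getD m []).length (le_refl _)
      · rw [if_neg hwin]
  rw [main R.length (le_refl _)]

theorem rCnt_nox (x5 : Int) (row : List String)
    (H : ∀ j, j < row.length → (x5 - 1 ≤ (j : Int) ∧ (j : Int) < x5 + 2) → row.getD j "" ≠ "x") :
    ∀ k, k ≤ row.length → rCnt x5 row k = 0 := by
  intro k
  induction k with
  | zero => intro _; rfl
  | succ k ih =>
    intro hk
    have h1 := ih (by omega)
    simp only [rCnt, h1]
    rw [if_neg (by rintro ⟨hw, hc⟩; exact H k (by omega) hw hc)]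
    ring

theorem rowsCnt_nox (x5 y5 : Int) (R : List (List String))
    (H : ∀ i ∈ List.range R.length, ∀ j ∈ List.range (R.getD i []).length,
      (y5 - 1 ≤ (i : Int) ∧ (i : Int) < y5 + 2 ∧ x5 - 1 ≤ (j : Int) ∧ (j : Int) < x5 + 2) →
      (R.getD i []).getD j "" ≠ "x") :
    rowsCnt x5 y5 R R.length = 0 := by
  suffices h : ∀ m, m ≤ R.length → rowsCnt x5 y5 R m = 0 from h R.length (le_refl _)
  intro m
  induction m with
  | zero => intro _; rfl
  | succ m ih =>
    intro hm
    have h1 := ih (by omega)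
    simp only [rowsCnt, h1]
    by_cases hwin : y5 - 1 ≤ (m : Int) ∧ (m : Int) < y5 + 2
    · rw [if_pos hwin]
      rw [rCnt_nox x5 (R.getD m []) (fun j hj hw =>
        H m (List.mem_range.mpr (by omega)) j (List.mem_range.mpr hj) ⟨hwin.1, hwin.2, hw.1, hw.2⟩)
        (R.getD m []).length (le_refl _)]
      ring
    · rw [if_neg hwin]; ring

-- ---------- the "earlier ninja" condition vs. beforeC ----------

theorem rCnt_pos_iff (x5 : Int) (row : List String) (k : Nat) :
    1 ≤ rCnt x5 row k ↔
    ∃ j, j < k ∧ (x5 - 1 ≤ (j : Int) ∧ (j : Int) < x5 + 2) ∧ row.getD j "" = "x" := by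
  induction k with
  | zero => simp [rCnt]
  | succ k ih =>
    constructor
    · intro h
      simp only [rCnt] at h
      split at h
      · rename_i hcond
        by_cases h1 : 1 ≤ rCnt x5 row k
        · obtain ⟨j, hj, hw, hc⟩ := ih.mp h1
          exact ⟨j, by omega, hw, hc⟩
        · exact ⟨k, by omega, hcond.1, hcond.2⟩
      · obtain ⟨j, hj, hw, hc⟩ := ih.mp (by omega)
        exact ⟨j, by omega, hw, hc⟩
    · rintro ⟨j, hj, hw, hc⟩
      simp only [rCnt]
      rcases Nat.lt_or_ge j k with h' | h'
      · have := ih.mpr ⟨j, h', hw, hc⟩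
        split <;> omega
      · have hjk : j = k := by omega
        subst hjk
        rw [if_pos ⟨hw, hc⟩]
        have := rCnt_nonneg x5 row j
        omega

theorem rowsCnt_pos_iff (x5 y5 : Int) (R : List (List String)) (m : Nat) :
    1 ≤ rowsCnt x5 y5 R m ↔
    ∃ i, i < m ∧ (y5 - 1 ≤ (i : Int) ∧ (i : Int) < y5 + 2) ∧
      1 ≤ rCnt x5 (R.getD i []) (R.getD i []).length := by
  induction m with
  | zero => simp [rowsCnt]
  | succ m ih =>
    constructor
    · intro h
      simp only [rowsCnt] at h
      split at h
      · rename_i hcond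
        by_cases h1 : 1 ≤ rowsCnt x5 y5 R m
        · obtain ⟨i, hi, hw, hc⟩ := ih.mp h1
          exact ⟨i, by omega, hw, hc⟩
        · exact ⟨m, by omega, hcond, by omega⟩
      · obtain ⟨i, hi, hw, hc⟩ := ih.mp (by omega)
        exact ⟨i, by omega, hw, hc⟩
    · rintro ⟨i, hi, hw, hc⟩
      simp only [rowsCnt]
      rcases Nat.lt_or_ge i m with h' | h'
      · have := ih.mpr ⟨i, h', hw, hc⟩
        have h2 := rCnt_nonneg x5 (R.getD m []) (R.getD m []).length
        split <;> omega
      · have him : i = m := by omega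
        subst him
        rw [if_pos hw]
        have := rowsCnt_nonneg x5 y5 R i
        omega

theorem before_pos_iff (R : List (List String)) (Y X : Nat)
    (hY : Y < R.length) (hX : X < (R.getD Y []).length) :
    1 ≤ beforeC X Y R ↔
    (∃ i ∈ List.range R.length, ∃ j ∈ List.range (R.getD i []).length,
      ((Y : Int) - 1 ≤ (i : Int) ∧ (i : Int) < (Y : Int) + 2 ∧
       (X : Int) - 1 ≤ (j : Int) ∧ (j : Int) < (X : Int) + 2) ∧
      ((i : Int) < (Y : Int) ∨ ((i : Int) = (Y : Int) ∧ (j : Int) < (X : Int))) ∧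
      (R.getD i []).getD j "" = "x") := by
  unfold beforeC
  constructor
  · intro h
    have hrn := rowsCnt_nonneg (X : Int) (Y : Int) R Y
    have hcn := rCnt_nonneg (X : Int) (R.getD Y []) X
    by_cases h1 : 1 ≤ rowsCnt (X : Int) (Y : Int) R Y
    case neg =>
      have h2 : 1 ≤ rCnt (X : Int) (R.getD Y []) X := by omega
      obtain ⟨j, hj, hwc, hc⟩ := (rCnt_pos_iff _ _ _).mp h2
      exact ⟨Y, List.mem_range.mpr hY, j, List.mem_range.mpr (by omega),
        ⟨by omega, by omega, hwc.1, hwc.2⟩, Or.inr ⟨rfl, by exact_mod_cast hj⟩, hc⟩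
    case pos =>
      obtain ⟨i, hiY, hwr, hpos⟩ := (rowsCnt_pos_iff _ _ R Y).mp h1
      obtain ⟨j, hj, hwc, hc⟩ := (rCnt_pos_iff _ _ _).mp hpos
      exact ⟨i, List.mem_range.mpr (by omega), j, List.mem_range.mpr hj,
        ⟨hwr.1, hwr.2, hwc.1, hwc.2⟩, Or.inl (by exact_mod_cast hiY), hc⟩
  · rintro ⟨i, hiL, j, hj, hwin, hlex, hc⟩
    have hiL' := List.mem_range.mp hiL
    have hj' := List.mem_range.mp hj
    have hrn := rowsCnt_nonneg (X : Int) (Y : Int) R Y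
    have hcn := rCnt_nonneg (X : Int) (R.getD Y []) X
    rcases hlex with hlt | ⟨hieq, hjlt⟩
    · have hiY : i < Y := by exact_mod_cast hlt
      have h1 : 1 ≤ rCnt (X : Int) (R.getD i []) (R.getD i []).length := by
        rw [rCnt_pos_iff]
        exact ⟨j, hj', ⟨hwin.2.2.1, hwin.2.2.2⟩, hc⟩
      have h2 : 1 ≤ rowsCnt (X : Int) (Y : Int) R Y := by
        rw [rowsCnt_pos_iff]
        exact ⟨i, hiY, ⟨hwin.1, hwin.2.1⟩, h1⟩
      omega
    · have hiY : i = Y := by exact_mod_cast hieq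
      subst hiY
      have hjX : j < X := by exact_mod_cast hjlt
      have h1 : 1 ≤ rCnt (X : Int) (R.getD i []) X := by
        rw [rCnt_pos_iff]
        exact ⟨j, hjX, ⟨hwin.2.2.1, hwin.2.2.2⟩, hc⟩
      omega

theorem wcnt_pos_of_center (R : List (List String)) (Y X : Nat)
    (hY : Y < R.length) (hX : X < (R.getD Y []).length)
    (hc : (R.getD Y []).getD X "" = "x") :
    1 ≤ rowsCnt (X : Int) (Y : Int) R R.length := by
  have h1 : 1 ≤ rCnt (X : Int) (R.getD Y []) (R.getD Y []).length := by
    rw [rCnt_pos_iff]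
    exact ⟨X, hX, ⟨by omega, by omega⟩, hc⟩
  rw [rowsCnt_pos_iff]
  exact ⟨Y, hY, ⟨by omega, by omega⟩, h1⟩

-- a getD hit of "x" certifies the index is in range (out of range would read the default)
theorem row_lt_of_cell {l : List String} {n : Nat} (h : l.getD n "" = "x") : n < l.length := by
  by_contra hn
  push_neg at hn
  rw [List.getD_eq_getElem?_getD, List.getElem?_eq_none hn] at h
  simp at h

theorem rowidx_lt_of_cell {R : List (List String)} {p q : Nat}
    (h : (R.getD p []).getD q "" = "x") : p < R.length := by
  by_contra hn
  push_neg at hn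
  rw [List.getD_eq_getElem?_getD (l := R), List.getElem?_eq_none hn] at h
  simp at h

-- the four-offset form of "an earlier window cell holds a ninja" says exactly beforeC ≥ 1
theorem earlier_iff (R : List (List String)) (Y X : Nat)
    (hY : Y < R.length) (hX : X < (R.getD Y []).length) :
    (∃ d ∈ [((-1 : Int), (-1 : Int)), (-1, 0), (-1, 1), (0, -1)],
      0 ≤ (Y : Int) + d.1 ∧ 0 ≤ (X : Int) + d.2 ∧
      (R.getD ((Y : Int) + d.1).toNat []).getD ((X : Int) + d.2).toNat "" = "x")
    ↔ 1 ≤ beforeC X Y R := by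
  rw [before_pos_iff R Y X hY hX]
  constructor
  · rintro ⟨d, hd, h1, h2, hcell⟩
    simp only [List.mem_cons, List.not_mem_nil, or_false] at hd
    rcases hd with rfl | rfl | rfl | rfl
    · exact ⟨((Y : Int) + -1).toNat, List.mem_range.mpr (rowidx_lt_of_cell hcell),
        ((X : Int) + -1).toNat, List.mem_range.mpr (row_lt_of_cell hcell),
        ⟨by omega, by omega, by omega, by omega⟩, Or.inl (by omega), hcell⟩
    · exact ⟨((Y : Int) + -1).toNat, List.mem_range.mpr (rowidx_lt_of_cell hcell),
        ((X : Int) + 0).toNat, List.mem_range.mpr (row_lt_of_cell hcell),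
        ⟨by omega, by omega, by omega, by omega⟩, Or.inl (by omega), hcell⟩
    · exact ⟨((Y : Int) + -1).toNat, List.mem_range.mpr (rowidx_lt_of_cell hcell),
        ((X : Int) + 1).toNat, List.mem_range.mpr (row_lt_of_cell hcell),
        ⟨by omega, by omega, by omega, by omega⟩, Or.inl (by omega), hcell⟩
    · exact ⟨((Y : Int) + 0).toNat, List.mem_range.mpr (rowidx_lt_of_cell hcell),
        ((X : Int) + -1).toNat, List.mem_range.mpr (row_lt_of_cell hcell),
        ⟨by omega, by omega, by omega, by omega⟩, Or.inr ⟨by omega, by omega⟩, hcell⟩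
  · rintro ⟨i, hiL, j, hjL, ⟨w1, w2, w3, w4⟩, hlex, hc⟩
    have hi' := List.mem_range.mp hiL
    have hj' := List.mem_range.mp hjL
    rcases hlex with hlt | ⟨hieq, hjlt⟩
    · have hj2 : (j : Int) = (X : Int) + -1 ∨ (j : Int) = (X : Int) + 0 ∨ (j : Int) = (X : Int) + 1 := by
        omega
      rcases hj2 with hj2 | hj2 | hj2
      · refine ⟨(-1, -1), by simp, by omega, by omega, ?_⟩
        rw [show ((Y : Int) + -1).toNat = i by omega, show ((X : Int) + -1).toNat = j by omega]
        exact hc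
      · refine ⟨(-1, 0), by simp, by omega, by omega, ?_⟩
        rw [show ((Y : Int) + -1).toNat = i by omega, show ((X : Int) + 0).toNat = j by omega]
        exact hc
      · refine ⟨(-1, 1), by simp, by omega, by omega, ?_⟩
        rw [show ((Y : Int) + -1).toNat = i by omega, show ((X : Int) + 1).toNat = j by omega]
        exact hc
    · refine ⟨(0, -1), by simp, by omega, by omega, ?_⟩
      rw [show ((Y : Int) + 0).toNat = i by omega, show ((X : Int) + -1).toNat = j by omega]
      exact hc

-- ---------- assembling the verdicts ----------

theorem cast_center_row (R : List (List String)) (Y : Nat) :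
    R.getD ((Y : Int)).toNat [] = R.getD Y [] := by simp

theorem main_cv (R : List (List String)) (Y X : Nat)
    (hY : Y < R.length) (hX : X < (R.getD Y []).length)
    (hnD : ¬ D_count_ninjas (X : Int) (Y : Int) R) :
    count_ninjas (X : Int) (Y : Int) R = count_ninjas_alt (X : Int) (Y : Int) R := by
  rw [A_char R Y X hY hX, B_char]
  have hcorr : ¬ ((R.getD Y []).getD X "" = "x" ∧ 1 ≤ beforeC X Y R) := by
    rintro ⟨hcx, hb⟩
    apply hnD
    rw [D_elim]
    refine ⟨Int.natCast_nonneg Y, Int.natCast_nonneg X, ?_, ?_⟩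
    · simp only [Int.toNat_natCast]; exact hcx
    · exact (earlier_iff R Y X hY hX).mpr hb
  rw [if_neg hcorr, sub_zero]

-- ===== VERDICT (by name: the statement is the Claim_ definition above) =====
theorem count_ninjas_spec : Claim_unchanged_count_ninjas := by
  intro x5 y5 R hdom hpre
  unfold Spec_count_ninjas
  intro hnD
  rcases hpre with ⟨hy0, hyL, hx0, hxL⟩ | hnox
  · obtain ⟨Y, rfl⟩ : ∃ Y : Nat, y5 = (Y : Int) := ⟨y5.toNat, (Int.toNat_of_nonneg hy0).symm⟩
    obtain ⟨X, rfl⟩ : ∃ X : Nat, x5 = (X : Int) := ⟨x5.toNat, (Int.toNat_of_nonneg hx0).symm⟩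
    have hY : Y < R.length := by exact_mod_cast hyL
    rw [cast_center_row] at hxL
    have hX : X < (R.getD Y []).length := by exact_mod_cast hxL
    exact main_cv R Y X hY hX hnD
  · rw [A_nox _ _ _ hnox, B_char, rowsCnt_nox _ _ _ hnox]

theorem count_ninjas_changed : Claim_changed_count_ninjas := by
  unfold Claim_changed_count_ninjas; decide

theorem count_ninjas_tight : Claim_exact_count_ninjas := by
  intro x5 y5 R hdom hpre hD
  rw [D_elim] at hD
  obtain ⟨hy0, hx0, hcx, hex⟩ := hD
  obtain ⟨Y, rfl⟩ : ∃ Y : Nat, y5 = (Y : Int) := ⟨y5.toNat, (Int.toNat_of_nonneg hy0).symm⟩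
  obtain ⟨X, rfl⟩ : ∃ X : Nat, x5 = (X : Int) := ⟨x5.toNat, (Int.toNat_of_nonneg hx0).symm⟩
  simp only [Int.toNat_natCast] at hcx
  have hY : Y < R.length := rowidx_lt_of_cell hcx
  have hX : X < (R.getD Y []).length := row_lt_of_cell hcx
  have hb : 1 ≤ beforeC X Y R := (earlier_iff R Y X hY hX).mp hex
  rw [A_char R Y X hY hX, B_char, if_pos ⟨hcx, hb⟩]
  have h1 := wcnt_pos_of_center R Y X hY hX hcx
  have h9 := wcnt_le_nine (X : Int) (Y : Int) R
  exact toStr_injOn_small (by omega) h9 (by omega)
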